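-- pv_equiv track=rewrite | github.com/jangseungwon08/coding-test | 프로그래머스/0/181918. 배열 만들기 4/배열 만들기 4.py | solution
-- ===== SOURCE A (Python) =====
-- def solution(arr):
--     stk = []
--     i = 0
--     #i가 arr의 길이보다 작을때만 while문 동작
--     while i < len(arr):
--         #len(stk) 가 빈 배열일 때
--         if len(stk) == 0:
--             #stk에 arr[i]번째 value값 append
--             stk.append(arr[i])
--             #i에 1 더함
--             i += 1
--             #stk에 원소가 있고 arr[i] value값이 stk의 마지막 원소 값 보다 크면
--         elif len(stk) > 0 and arr[i] > stk[-1]: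
--             #stk에 arr[i] value값 append
--             stk.append(arr[i])
--             #i에 1 더함
--             i += 1
--             #stk에 원소가 있고 stk마지막 원소가 arr[i] value값 보다 크거나 같으면
--         elif len(stk)> 0 and stk[-1] >= arr[i]:
--             #stk 마지막 원소를 stk에서 제거(pop)
--             stk.pop()
--     return stk
-- ===== SOURCE B (Python) =====
-- def solution(arr):
--     # right-to-left pass keeping strict suffix minima; kept[-1] is the running minimum
--     kept = []
--     for x in reversed(arr):
--         if not kept or x < kept[-1]:
--             kept.append(x)
--     return kept[::-1]
-- ===== Notes on version B (the rewrite author's own statement) =====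
-- stated objective: simpler
-- what changed: Replaces the left-to-right stack simulation (push when larger, pop while top >= current, index not advancing on pops) by a single right-to-left pass that keeps an element exactly when it is below the running suffix minimum, then reverses the kept list; each element is visited once with one scalar comparison instead of the while-loop's re-reads and list pops.
import Mathlib
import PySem

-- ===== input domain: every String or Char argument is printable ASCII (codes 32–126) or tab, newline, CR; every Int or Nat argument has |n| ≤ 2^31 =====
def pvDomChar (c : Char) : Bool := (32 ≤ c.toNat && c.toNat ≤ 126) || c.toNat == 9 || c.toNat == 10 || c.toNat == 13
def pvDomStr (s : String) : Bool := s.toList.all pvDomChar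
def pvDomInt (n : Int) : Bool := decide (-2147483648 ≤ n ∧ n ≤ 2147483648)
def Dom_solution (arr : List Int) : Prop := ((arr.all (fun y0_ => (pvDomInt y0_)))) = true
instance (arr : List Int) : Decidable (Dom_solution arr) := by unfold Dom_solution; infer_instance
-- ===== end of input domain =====

-- B replaces A's left-to-right stack simulation by a right-to-left suffix-minimum scan; objective: simpler.

-- ===== PORT A =====
-- A's while loop, transliterated with the remaining suffix 'rest' in place of the index i
-- (arr[i] = rest.head) and the Python stack stored top-first (stk[-1] = head, append = cons,
-- pop = tail); the returned Python stack (bottom-first) is therefore stk.reverse.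
-- In the pop branch i does not advance, so 'rest' stays and only the stack shrinks.
def solutionLoop (rest : List Int) (stk : List Int) : List Int :=
  match rest, stk with
  | [], stk => stk.reverse
  | x :: rs, [] => solutionLoop rs (x :: [])
  | x :: rs, h :: t =>
      if x > h then solutionLoop rs (x :: h :: t)
      else solutionLoop (x :: rs) t
termination_by rest.length * 2 + stk.length
decreasing_by all_goals (simp; try omega)

def solution (arr : List Int) : List Int := solutionLoop arr []

-- ===== PORT B =====
-- Source B: kept list stored with the most recently appended element first (kept[-1] = head),
-- so kept[::-1] is this list itself.
def solution_alt (arr : List Int) : List Int :=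
  arr.reverse.foldl
    (fun kept x =>
      match kept with
      | [] => [x]
      | y :: _ => if x < y then x :: kept else kept) []

-- ===== PRECONDITION & SPEC =====
def Spec_solution (arr : List Int) (out : List Int) : Prop := out = solution_alt arr
instance (arr : List Int) (out : List Int) : Decidable (Spec_solution arr out) := by unfold Spec_solution; infer_instance

-- ===== CLAIM (what is proved, stated in full; the proofs are below) =====
def Claim_equal_solution : Prop := ∀ (arr : List Int), Dom_solution arr → Spec_solution arr (solution arr)

-- ===== LEMMAS AND PROOFS =====

-- the step of B, as a foldr step
def bStep (x : Int) (acc : List Int) : List Int :=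
  match acc with
  | [] => [x]
  | y :: _ => if x < y then x :: acc else acc

def fB (xs : List Int) : List Int := xs.foldr bStep []

lemma solution_alt_eq_fB (arr : List Int) : solution_alt arr = fB arr := by
  unfold solution_alt fB
  rw [← List.foldr_reverse, List.reverse_reverse]
  rfl

-- the step of A, seen as one whole iteration of the while loop over one input element
def aStep (stk : List Int) (x : Int) : List Int :=
  x :: stk.dropWhile (fun h => decide (x ≤ h))

lemma loop_pop (x : Int) (rs stk : List Int) :
    solutionLoop (x :: rs) stk = solutionLoop rs (aStep stk x) := by
  induction stk with
  | nil => simp [solutionLoop, aStep, List.dropWhile]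
  | cons h t ih =>
      by_cases hx : x > h
      · simp [solutionLoop, hx, aStep, List.dropWhile, show ¬ (x ≤ h) by omega]
      · have : ¬ x > h := hx
        simp only [solutionLoop, if_neg this]
        rw [ih]
        simp [aStep, List.dropWhile, show (x ≤ h) by omega]

lemma loop_foldl (rest stk : List Int) :
    solutionLoop rest stk = (rest.foldl aStep stk).reverse := by
  induction rest generalizing stk with
  | nil => simp [solutionLoop]
  | cons x rs ih => rw [loop_pop, List.foldl_cons, ih]

-- head of fB is a minimum of xs and fB is nonempty for nonempty xs
lemma fB_head_min (xs : List Int) (hne : xs ≠ []) :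
    ∃ m t, fB xs = m :: t ∧ m ∈ xs ∧ ∀ y ∈ xs, m ≤ y := by
  induction xs with
  | nil => exact absurd rfl hne
  | cons x rs ih =>
      cases hr : rs with
      | nil => exact ⟨x, [], by simp [fB, bStep], by simp, by simp⟩
      | cons a b =>
          obtain ⟨m, t, hfb, hmem, hmin⟩ := ih (by simp [hr])
          rw [← hr]
          by_cases hx : x < m
          · refine ⟨x, m :: t, ?_, by simp, ?_⟩
            · simp [fB, bStep] at hfb ⊢; rw [hfb]; simp [hx]
            · intro y hy
              rcases List.mem_cons.1 hy with h | h
              · omega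
              · have := hmin y h; omega
          · refine ⟨m, t, ?_, List.mem_cons_of_mem _ hmem, ?_⟩
            · simp [fB, bStep] at hfb ⊢; rw [hfb]; simp [hx]
            · intro y hy
              rcases List.mem_cons.1 hy with h | h
              · omega
              · exact hmin y h
  
lemma filter_of_all_lt (x : Int) (p : Int → Bool) (l : List Int)
    (h : ∀ h' ∈ l, h' < x) :
    l.filter (fun h' => decide (h' < x) && p h') = l.filter p := by
  induction l with
  | nil => rfl
  | cons a t ih =>
      have ha : a < x := h a (by simp)
      simp [List.filter, ha, ih (fun h' hm => h (h') (by simp [hm]))]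

lemma filter_dropWhile (x : Int) (p : Int → Bool) (stk : List Int)
    (hp : stk.Pairwise (· > ·)) :
    stk.filter (fun h => decide (h < x) && p h)
      = (stk.dropWhile (fun h => decide (x ≤ h))).filter p := by
  induction stk with
  | nil => rfl
  | cons a t ih =>
      rcases List.pairwise_cons.1 hp with ⟨hgt, hpt⟩
      by_cases hax : x ≤ a
      · simp [List.filter, List.dropWhile, hax, show ¬ (a < x) by omega, ih hpt]
      · have hax' : a < x := by omega
        rw [List.dropWhile_cons_of_neg (by simp [hax])]
        exact filter_of_all_lt x p (a :: t)
          (by intro h' hm; rcases List.mem_cons.1 hm with h | h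
              · omega
              · have := hgt h' h; omega)

lemma dropWhile_pairwise (x : Int) (stk : List Int) (hp : stk.Pairwise (· > ·)) :
    (x :: stk.dropWhile (fun h => decide (x ≤ h))).Pairwise (· > ·) := by
  refine List.pairwise_cons.2 ⟨?_, List.Pairwise.sublist (List.dropWhile_sublist _) hp⟩
  intro a ha
  cases hd : stk.dropWhile (fun h => decide (x ≤ h)) with
  | nil => simp [hd] at ha
  | cons b t =>
      have hb : ¬ (x ≤ b) := by
        have := List.head?_dropWhile_not (p := fun h => decide (x ≤ h)) stk
        rw [hd] at this; simpa using this
      rw [hd] at ha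
      have hsub : (b :: t).Pairwise (· > ·) :=
        List.Pairwise.sublist (by rw [← hd]; exact List.dropWhile_sublist _) hp
      rcases List.mem_cons.1 ha with h | h
      · omega
      · rcases List.pairwise_cons.1 hsub with ⟨hbt, _⟩
        have := hbt a h; omega

-- main invariant: folding A's step over xs starting from a strictly decreasing stack
-- yields (fB xs).reverse followed by the stack elements below every element of xs
lemma foldl_aStep_eq (xs : List Int) :
    ∀ stk, stk.Pairwise (· > ·) →
      xs.foldl aStep stk
        = (fB xs).reverse ++ stk.filter (fun h => xs.all (fun y => decide (h < y))) := by
  induction xs with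
  | nil => intro stk _; simp [fB]
  | cons x rs ih =>
      intro stk hp
      rw [List.foldl_cons]
      have hpair := dropWhile_pairwise x stk hp
      rw [show aStep stk x = x :: stk.dropWhile (fun h => decide (x ≤ h)) from rfl]
      rw [ih _ hpair]
      have hfilter := filter_dropWhile x (fun h => rs.all (fun y => decide (h < y))) stk hp
      cases hrs : rs with
      | nil =>
          subst hrs
          simp [fB, bStep]
          simpa using hfilter.symm
      | cons a b =>
          obtain ⟨m, t, hfb, hmem, hmin⟩ := fB_head_min rs (by simp [hrs])
          rw [← hrs]
          by_cases hx : x < m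
          · -- x is kept: fB (x::rs) = x :: fB rs
            have hxall : rs.all (fun y => decide (x < y)) = true := by
              simp only [List.all_eq_true]
              intro y hy; have := hmin y hy; simp; omega
            have hfx : fB (x :: rs) = x :: fB rs := by
              simp only [fB, List.foldr_cons]
              rw [show rs.foldr bStep [] = fB rs from rfl, hfb]
              simp [bStep, hx]
            rw [hfx]
            simp only [List.filter, hxall, List.reverse_cons, List.all_cons]
            rw [hfilter]
            simp
          · -- x is dropped: fB (x::rs) = fB rs
            have hxall : rs.all (fun y => decide (x < y)) = false := by
              simp only [List.all_eq_false]
              exact ⟨m, hmem, by simp; omega⟩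
            have hfx : fB (x :: rs) = fB rs := by
              simp only [fB, List.foldr_cons]
              rw [show rs.foldr bStep [] = fB rs from rfl, hfb]
              simp [bStep, hx]
            rw [hfx]
            simp only [List.filter, hxall, List.all_cons]
            rw [hfilter]

-- ===== VERDICT (by name: the statement is the Claim_ definition above) =====
theorem solution_spec : Claim_equal_solution := by
  intro arr _
  show solution arr = solution_alt arr
  rw [solution, loop_foldl, foldl_aStep_eq arr [] (by simp), solution_alt_eq_fB]
  simp
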